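-- pv_equiv track=rewrite | github.com/jdhibberd/moon | uimodules.py | _get_people_counts
-- ===== SOURCE A (Python) =====
-- from collections import Counter, defaultdict
--
-- def _get_people_counts(notes):
--     people_counts = Counter()
--     none_count = 0
--     for note in notes:
--         people = note["people"]
--         if people:
--             people_counts.update(people)
--         else:
--             none_count += 1
--     return sorted(people_counts.items()), none_count
-- ===== SOURCE B (Python) =====
-- def _get_people_counts(notes):
--     # Sort-and-group instead of hash counting: collect all people, sort once,
--     # then run-length-encode adjacent runs; the result is already in sorted order.
--     none_count = sum(1 for note in notes if not note["people"])
--     flat = sorted(p for note in notes for p in note["people"])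
--     counts = []
--     i = 0
--     n = len(flat)
--     while i < n:
--         j = i + 1
--         while j < n and flat[j] == flat[i]:
--             j += 1
--         counts.append((flat[i], j - i))
--         i = j
--     return counts, none_count
-- ===== Notes on version B (the rewrite author's own statement) =====
-- stated objective: alternative
-- what changed: A tallies people into a hash Counter inside one branched loop and then sorts the items; B instead collects all people into one flat list, sorts it once, and run-length-encodes adjacent runs, so the counts come out already in sorted order with no dictionary at all.
import Mathlib
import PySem

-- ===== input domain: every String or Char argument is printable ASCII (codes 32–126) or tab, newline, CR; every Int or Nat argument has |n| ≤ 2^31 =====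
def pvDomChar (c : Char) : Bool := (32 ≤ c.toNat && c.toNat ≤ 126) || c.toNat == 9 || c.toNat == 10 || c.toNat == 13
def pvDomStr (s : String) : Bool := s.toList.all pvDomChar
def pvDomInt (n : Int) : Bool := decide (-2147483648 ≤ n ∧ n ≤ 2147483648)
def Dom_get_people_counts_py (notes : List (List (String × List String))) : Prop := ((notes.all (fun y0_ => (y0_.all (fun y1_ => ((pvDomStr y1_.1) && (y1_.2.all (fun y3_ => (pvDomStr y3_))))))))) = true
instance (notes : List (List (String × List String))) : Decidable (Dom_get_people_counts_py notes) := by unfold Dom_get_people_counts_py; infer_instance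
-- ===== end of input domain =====

-- B replaces A's hash counting (a Counter maintained in a branched loop, then sorted) by
-- sort-and-group: collect all people, sort once, run-length-encode adjacent runs, so the
-- counts come out already in sorted order with no dictionary (objective: alternative).

-- note["people"]: first-match association-list lookup; the KeyError case (key absent)
-- is excluded by Pre_, where this total form defaults to [].
def pvPeople (note : List (String × List String)) : List String :=
  (List.lookup "people" note).getD []

-- ===== PORT A =====
def get_people_counts_py (notes : List (List (String × List String))) : (List (String × Int)) × Int :=
  let r := notes.foldl
    (fun (st : PySem.Dict String Int × Int) note =>
      let people := pvPeople note
      if people ≠ [] then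
        (people.foldl (fun d p => d.modify p 0 (· + 1)) st.1, st.2)
      else
        (st.1, st.2 + 1))
    (PySem.Dict.empty, 0)
  (PySem.List.sorted2 r.1.items (fun p => p.1) (fun p => p.2) false, r.2)

-- ===== PORT B =====
-- Source B's grouping while-loop: each step emits the run at position i (flat[i] with
-- multiplicity j - i = 1 + length of the following equal prefix) and continues at j.
def pvRle : List String → List (String × Int)
  | [] => []
  | p :: rest =>
      (p, ((rest.takeWhile (fun q => q == p)).length : Int) + 1) ::
        pvRle (rest.dropWhile (fun q => q == p))
  termination_by flat => flat.length
  decreasing_by exact Nat.lt_succ_of_le (List.dropWhile_sublist _).length_le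

def get_people_counts_py_alt (notes : List (List (String × List String))) : (List (String × Int)) × Int :=
  let none_count : Int := (notes.countP (fun note => pvPeople note == []) : Int)
  let flat := PySem.List.sorted (notes.flatMap pvPeople) (fun x => x) false
  (pvRle flat, none_count)

-- ===== PRECONDITION & SPEC =====
-- Pre_ excludes exactly the notes missing the "people" key, where Python A raises KeyError.
def Pre_get_people_counts_py (notes : List (List (String × List String))) : Prop :=
  (notes.all (fun note => note.any (fun p => p.1 == "people"))) = true
instance (notes : List (List (String × List String))) : Decidable (Pre_get_people_counts_py notes) := by unfold Pre_get_people_counts_py; infer_instance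

def pvWitness_get_people_counts_py : (List (List (String × List String))) :=
  [[("people", ["ann", "bob"])], [("people", [])]]

def Spec_get_people_counts_py (notes : List (List (String × List String))) (out : (List (String × Int)) × Int) : Prop := out = get_people_counts_py_alt notes
instance (notes : List (List (String × List String))) (out : (List (String × Int)) × Int) : Decidable (Spec_get_people_counts_py notes out) := by unfold Spec_get_people_counts_py; infer_instance

-- ===== CLAIM (what is proved, stated in full; the proofs are below) =====
def Claim_equal_get_people_counts_py : Prop := ∀ (notes : List (List (String × List String))), Dom_get_people_counts_py notes → Pre_get_people_counts_py notes → Spec_get_people_counts_py notes (get_people_counts_py notes)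

-- ===== LEMMAS AND PROOFS =====

-- folding a flatMapped list = folding the inner lists note by note
lemma foldl_flatMap_eq {α β γ : Type} (g : α → List β) (step : γ → β → γ) :
    ∀ (xs : List α) (init : γ),
      ((xs.flatMap g).foldl step init) = xs.foldl (fun acc x => (g x).foldl step acc) init := by
  intro xs
  induction xs with
  | nil => intro init; rfl
  | cons x xs ih => intro init; simp [List.flatMap_cons, List.foldl_append, ih]

-- A's combined loop = (the Counter of all people, the count of people-less notes)
lemma a_loop_eq (notes : List (List (String × List String))) :
    notes.foldl
      (fun (st : PySem.Dict String Int × Int) note =>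
        let people := pvPeople note
        if people ≠ [] then
          (people.foldl (fun d p => d.modify p 0 (· + 1)) st.1, st.2)
        else
          (st.1, st.2 + 1))
      (PySem.Dict.empty, 0)
    = (PySem.Dict.counter (notes.flatMap pvPeople),
       (notes.countP (fun note => pvPeople note == []) : Int)) := by
  have hstep :
      (fun (st : PySem.Dict String Int × Int) note =>
        let people := pvPeople note
        if people ≠ [] then
          (people.foldl (fun d p => d.modify p 0 (· + 1)) st.1, st.2)
        else
          (st.1, st.2 + 1))
      = (fun (st : PySem.Dict String Int × Int) note =>
          ((pvPeople note).foldl (fun d p => d.modify p 0 (· + 1)) st.1,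
           if pvPeople note = [] then st.2 + 1 else st.2)) := by
    funext st note
    by_cases h : pvPeople note = [] <;> simp [h]
  rw [hstep,
      PySem.List.foldl_prod_mk
        (f := fun (d : PySem.Dict String Int) note => (pvPeople note).foldl (fun d p => d.modify p 0 (· + 1)) d)
        (g := fun (n : Int) note => if pvPeople note = [] then n + 1 else n)]
  rw [PySem.Dict.counter_eq_foldl,
      foldl_flatMap_eq pvPeople (fun (d : PySem.Dict String Int) (p : String) => d.modify p 0 (· + 1))]
  rw [PySem.List.foldl_ite_add_one (fun note => pvPeople note = [])]
  rw [zero_add]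
  congr 2
  apply List.countP_congr
  intro note _
  simp

-- the first element a dropWhile returns fails the predicate
lemma dropWhile_head_false {α : Type} (f : α → Bool) :
    ∀ (l : List α) (x : α) (xs : List α), l.dropWhile f = x :: xs → f x = false := by
  intro l
  induction l with
  | nil => intro x xs h; simp [List.dropWhile] at h
  | cons a l ih =>
      intro x xs h
      by_cases ha : f a = true
      · rw [List.dropWhile_cons_of_pos ha] at h; exact ih x xs h
      · rw [List.dropWhile_cons_of_neg ha] at h
        cases h; simpa using ha

-- discarding a non-member leaves a set unchanged
lemma discard_not_mem {α : Type} [BEq α] [LawfulBEq α] (s : List α) (x : α) (h : x ∉ s) :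
    PySem.Set.discard s x = s := by
  apply List.filter_eq_self.2
  intro q hq
  simp
  rintro rfl; exact h hq

-- Set.ofList of a run of p's followed by a p-free tail
lemma ofList_const_prefix (p : String) (d : List String) (hpd : p ∉ d) :
    ∀ (t : List String), (∀ q ∈ t, q = p) →
      PySem.Set.ofList (p :: (t ++ d)) = p :: PySem.Set.ofList d := by
  intro t
  induction t with
  | nil =>
      intro _
      rw [List.nil_append, PySem.Set.ofList_cons]
      congr 1
      exact discard_not_mem _ _ (by simpa [PySem.Set.mem_ofList] using hpd)
  | cons a t ih =>
      intro ha
      have hap : a = p := ha a (by simp)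
      subst hap
      have ih' := ih (fun q hq => ha q (List.mem_cons_of_mem _ hq))
      show PySem.Set.ofList (a :: (a :: (t ++ d))) = a :: PySem.Set.ofList d
      rw [PySem.Set.ofList_cons, ih']
      congr 1
      show PySem.Set.discard (a :: PySem.Set.ofList d) a = _
      simp only [PySem.Set.discard, List.filter_cons, beq_self_eq_true, Bool.not_true]
      simp only [Bool.false_eq_true, if_false]
      exact discard_not_mem _ _ (by simpa [PySem.Set.mem_ofList] using hpd)

-- PySem.Set.ofList is an (order-preserving) sublist of its input
lemma ofList_sublist {α : Type} [BEq α] [LawfulBEq α] (xs : List α) :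
    (PySem.Set.ofList xs).Sublist xs := by
  induction xs with
  | nil => simp [PySem.Set.ofList_nil]
  | cons x xs ih =>
      rw [PySem.Set.ofList_cons]
      refine List.Sublist.cons₂ x (List.Sublist.trans ?_ ih)
      show (List.filter _ (PySem.Set.ofList xs)).Sublist _
      exact List.filter_sublist

-- run-length encoding of a weakly sorted list = each distinct element with its count
lemma rle_closed : ∀ (ys : List String), ys.Pairwise (· ≤ ·) →
    pvRle ys = (PySem.Set.ofList ys).map (fun k => (k, (ys.count k : Int))) := by
  intro ys
  induction ys using pvRle.induct with
  | case1 => intro _; simp [pvRle, PySem.Set.ofList_nil]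
  | case2 p rest ih =>
      intro hs
      have hrest : rest.Pairwise (· ≤ ·) := (List.pairwise_cons.1 hs).2
      have hple : ∀ q ∈ rest, p ≤ q := (List.pairwise_cons.1 hs).1
      set t := rest.takeWhile (fun q => q == p) with htdef
      set d := rest.dropWhile (fun q => q == p) with hddef
      have htd : t ++ d = rest := List.takeWhile_append_dropWhile
      have ht : ∀ q ∈ t, q = p := fun q hq => by
        have := List.mem_takeWhile_imp hq
        simpa using this
      have hdsub : d.Sublist rest := List.dropWhile_sublist _
      have hdpair : d.Pairwise (· ≤ ·) := hrest.sublist hdsub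
      have hd : ∀ q ∈ d, p < q := by
        intro q hq
        cases hdd : d with
        | nil => rw [hdd] at hq; simp at hq
        | cons h d' =>
            have hdw : rest.dropWhile (fun q => q == p) = h :: d' := by rw [← hddef, hdd]
            have hhp : (h == p) = false := dropWhile_head_false _ rest h d' hdw
            have hhne : h ≠ p := by simpa using hhp
            have hhmem : h ∈ rest := hdsub.mem (by rw [hdd]; simp)
            have hph : p < h := lt_of_le_of_ne (hple h hhmem) (Ne.symm hhne)
            rw [hdd] at hq
            rcases List.mem_cons.1 hq with rfl | hq'
            · exact hph
            · have : h ≤ q := (List.pairwise_cons.1 (hdd ▸ hdpair)).1 q hq'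
              exact lt_of_lt_of_le hph this
      have hpd : p ∉ d := fun hmem => lt_irrefl p (hd p hmem)
      have hset : PySem.Set.ofList (p :: rest) = p :: PySem.Set.ofList d := by
        rw [← htd]; exact ofList_const_prefix p d hpd t ht
      rw [pvRle, ← htdef, ← hddef, hset, List.map_cons, ih hdpair]
      congr 1
      · have hct : t.count p = t.length := by
          rw [List.count_eq_length]
          intro b hb; exact (ht b hb).symm
        have hcd : d.count p = 0 := List.count_eq_zero.2 hpd
        have : (p :: rest).count p = t.length + 1 := by
          rw [← htd, List.count_cons_self, List.count_append, hct, hcd]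
        rw [this]
        push_cast
        ring_nf
      · apply List.map_congr_left
        intro k hk
        have hkd : k ∈ d := (PySem.Set.mem_ofList d k).1 hk
        have hkp : k ≠ p := fun h => lt_irrefl p (h ▸ hd k hkd)
        have hkt : k ∉ t := fun h => hkp (ht k h)
        have : (p :: rest).count k = d.count k := by
          rw [← htd, List.count_cons_of_ne hkp.symm, List.count_append,
              List.count_eq_zero.2 hkt, Nat.zero_add]
        rw [this]

-- insertBy only compares the inserted element against list members, on the left
lemma insertBy_congr {α : Type} (f g : α → α → Bool) (x : α) :
    ∀ (ys : List α), (∀ y ∈ ys, f x y = g x y) →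
      PySem.List.insertBy f x ys = PySem.List.insertBy g x ys := by
  intro ys
  induction ys with
  | nil => intro _; rfl
  | cons y ys ih =>
      intro h
      simp only [PySem.List.insertBy]
      rw [h y (by simp)]
      by_cases hb : g x y = true
      · simp [hb]
      · simp only [Bool.not_eq_true] at hb
        simp [hb, ih (fun z hz => h z (by simp [hz]))]

lemma foldl_insertBy_congr {α : Type} (f g : α → α → Bool) (P : α → Prop)
    (hfg : ∀ x y, P x → P y → f x y = g x y) :
    ∀ (l : List α) (acc : List α), (∀ a ∈ l, P a) → (∀ a ∈ acc, P a) →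
      l.foldl (fun acc x => PySem.List.insertBy f x acc) acc
        = l.foldl (fun acc x => PySem.List.insertBy g x acc) acc := by
  intro l
  induction l with
  | nil => intros; rfl
  | cons x l ih =>
      intro acc hl hacc
      simp only [List.foldl_cons]
      rw [insertBy_congr f g x acc (fun y hy => hfg x y (hl x (by simp)) (hacc y hy))]
      refine ih _ (fun a ha => hl a (by simp [ha])) (fun a ha => ?_)
      rcases (PySem.List.mem_insertBy g x a acc).1 ha with rfl | hmem
      · exact hl a (by simp)
      · exact hacc a hmem

-- Python's sorted on (key, value) pairs with distinct keys sorts by the key alone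
lemma sorted2_eq_sorted_of_nodup_keys (items : List (String × Int))
    (h : (items.map (fun p => p.1)).Nodup) :
    PySem.List.sorted2 items (fun p => p.1) (fun p => p.2) false
      = PySem.List.sorted items (fun p => p.1) false := by
  rw [PySem.List.sorted_eq_foldl_insertBy]
  show items.foldl (fun acc x => PySem.List.insertBy
      (fun a b => decide (a.1 < b.1) || (!decide (b.1 < a.1) && decide (a.2 < b.2))) x acc) [] = _
  apply foldl_insertBy_congr _ _ (fun a => a ∈ items)
  · intro x y hx hy
    by_cases hxy : x.1 = y.1
    · have : x = y := List.inj_on_of_nodup_map h hx hy hxy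
      subst this
      simp
    · rcases lt_or_gt_of_ne hxy with hlt | hgt
      · simp [hlt, not_lt_of_gt hlt]
      · simp [hgt, not_lt_of_gt hgt]
  · exact fun a ha => ha
  · intro a ha; simp at ha

-- sorting the Counter's items by key = run-length encoding the sorted flat list
lemma sorted_counter_items_eq (flat : List String) :
    PySem.List.sorted (PySem.Dict.counter flat).items (fun p => p.1) false
      = (PySem.Set.ofList (PySem.List.sorted flat (fun x => x) false)).map
          (fun k => (k, ((PySem.List.sorted flat (fun x => x) false).count k : Int))) := by
  set ms := PySem.List.sorted flat (fun x => x) false with hmsdef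
  have hms : ms.Perm flat := PySem.List.sorted_perm flat (fun x => x) false
  have hfun : (fun k => (k, (ms.count k : Int))) = (fun k => (k, (flat.count k : Int))) := by
    funext k; rw [hms.count_eq]
  have hpermset : (PySem.Set.ofList ms).Perm (PySem.Set.ofList flat) := by
    rw [List.perm_ext_iff_of_nodup (PySem.Set.nodup_ofList ms) (PySem.Set.nodup_ofList flat)]
    intro a
    rw [PySem.Set.mem_ofList, PySem.Set.mem_ofList, hms.mem_iff]
  have hperm : ((PySem.Set.ofList ms).map (fun k => (k, (ms.count k : Int)))).Perm
      (PySem.Dict.counter flat).items := by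
    rw [PySem.Dict.items_counter, hfun]
    exact hpermset.map _
  have hpairkeys : (PySem.Set.ofList ms).Pairwise (· < ·) := by
    have hle : (PySem.Set.ofList ms).Pairwise (· ≤ ·) :=
      (PySem.List.sorted_pairwise flat (fun x => x)).sublist (ofList_sublist ms)
    have hne : (PySem.Set.ofList ms).Pairwise (· ≠ ·) := PySem.Set.nodup_ofList ms
    exact (hle.and hne).imp (fun h => lt_of_le_of_ne h.1 h.2)
  have hpair : (((PySem.Set.ofList ms).map (fun k => (k, (ms.count k : Int))))).Pairwise
      (fun a b => a.1 < b.1) := List.pairwise_map.2 (by simpa using hpairkeys)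
  exact PySem.List.sorted_eq_of_perm_of_pairwise_lt _ _ _ hperm hpair

theorem get_people_counts_py_equal (notes : List (List (String × List String))) :
    get_people_counts_py notes = get_people_counts_py_alt notes := by
  simp only [get_people_counts_py, get_people_counts_py_alt]
  rw [a_loop_eq]
  have hnodup : ((PySem.Dict.counter (notes.flatMap pvPeople)).items.map (fun p => p.1)).Nodup := by
    have := PySem.Dict.nodup_keys_counter (notes.flatMap pvPeople)
    simpa [PySem.Dict.keys] using this
  rw [sorted2_eq_sorted_of_nodup_keys _ hnodup, sorted_counter_items_eq,
      rle_closed _ (PySem.List.sorted_pairwise _ _)]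

-- ===== VERDICT (by name: the statement is the Claim_ definition above) =====
theorem get_people_counts_py_spec : Claim_equal_get_people_counts_py := by
  intro notes _ _
  exact get_people_counts_py_equal notes
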